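-- pv_equiv track=rewrite | github.com/demichie/elicipy | tree.py | build_subtree
-- ===== SOURCE A (Python) =====
-- def build_subtree(idx_list, parents, node, tree_string):
--
--     childs = [idx_list[i] for i, p in enumerate(parents) if p == node]
--
--     rep_string = "TQ" + str(node)
--     child_string = "(TQ" + ",TQ".join(map(str, childs)) + ")"
--     if len(childs) > 0:
--         tree_string = tree_string.replace(rep_string,
--                                           child_string + rep_string)
--
--     for ch in childs:
--
--         childs, tree_string = build_subtree(idx_list, parents, ch, tree_string)
--
--     return childs, tree_string
-- ===== SOURCE B (Python) =====
-- def build_subtree(idx_list, parents, node, tree_string):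
--     # One pass builds a parent -> children dictionary (removing A's per-node
--     # enumerate scan), then an explicit-stack preorder loop replaces the recursion.
--     children = {}
--     for i, p in enumerate(parents):
--         children.setdefault(p, []).append(idx_list[i])
--     stack = [node]
--     while stack:
--         n = stack.pop()
--         ch = children.get(n, [])
--         if ch:
--             rep = "TQ" + str(n)
--             tree_string = tree_string.replace(
--                 rep, "(TQ" + ",TQ".join(map(str, ch)) + ")" + rep)
--             stack.extend(reversed(ch))
--     return [], tree_string
-- ===== Notes on version B (the rewrite author's own statement) =====
-- stated objective: alternative
-- what changed: Replaced A's recursion that rescans enumerate(parents) at every visited node by a dictionary parent->children built in one pass plus an explicit-stack preorder loop of dict lookups (a different algorithm/data structure of similar measured cost).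
-- outside the precondition, e.g. on build_subtree([], [5], 0, 'TQ0'): A returns ([], 'TQ0'), B raises IndexError; on build_subtree([-2], [-3, 3, 3], -3, 'TQ3xTQ2'): A returns ([], 'TQ3xTQ2'), B raises IndexError
import Mathlib
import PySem

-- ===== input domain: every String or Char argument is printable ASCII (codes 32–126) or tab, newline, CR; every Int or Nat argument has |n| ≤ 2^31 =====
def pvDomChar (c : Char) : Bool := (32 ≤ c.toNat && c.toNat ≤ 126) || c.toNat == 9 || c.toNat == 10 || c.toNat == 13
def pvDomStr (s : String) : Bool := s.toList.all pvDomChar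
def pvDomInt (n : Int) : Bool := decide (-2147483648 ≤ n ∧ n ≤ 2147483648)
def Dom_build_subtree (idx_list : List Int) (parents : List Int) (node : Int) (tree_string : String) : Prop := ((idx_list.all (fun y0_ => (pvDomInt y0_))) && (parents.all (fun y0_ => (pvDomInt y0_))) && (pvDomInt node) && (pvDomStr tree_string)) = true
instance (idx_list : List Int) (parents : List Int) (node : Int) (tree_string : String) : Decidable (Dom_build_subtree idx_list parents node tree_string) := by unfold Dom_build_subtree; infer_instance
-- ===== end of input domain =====

-- B builds a parent->children dictionary in ONE pass and replaces A's recursion (which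
-- rescans enumerate(parents) at every visited node) by an explicit-stack preorder loop
-- of dictionary lookups; return value equivalence is proved on Pre_ below.

-- ===== PORT A =====
-- the child comprehension '[idx_list[i] for i, p in enumerate(parents) if p == node]';
-- pyGetD's default 0 stands for the IndexError case, which Pre_ excludes
def pvChilds (idx_list parents : List Int) (node : Int) : List Int :=
  ((PySem.List.enumerate parents).filter (fun ip => ip.2 == node)).map
    (fun ip => PySem.List.pyGetD idx_list ip.1 0)

-- A's recursion, totalized with a depth fuel; under Pre_ (acyclic reachable part) the
-- recursion depth is at most idx_list.length + 1, so the fuel-0 branch is never reached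
-- on inputs the claim covers
def pvGoA (idx_list parents : List Int) : Nat → Int → String → List Int × String
  | 0, _, ts => ([], ts)
  | fuel+1, node, ts =>
    let childs := pvChilds idx_list parents node
    let rep_string := "TQ" ++ PySem.Int.toStr node
    let child_string := "(TQ" ++ PySem.Str.join ",TQ" (childs.map PySem.Int.toStr) ++ ")"
    let ts1 := if childs.length > 0
               then PySem.Str.replace ts rep_string (child_string ++ rep_string) else ts
    childs.foldl (fun acc ch => pvGoA idx_list parents fuel ch acc.2) (childs, ts1)

def build_subtree (idx_list : List Int) (parents : List Int) (node : Int) (tree_string : String) : List Int × String :=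
  pvGoA idx_list parents (idx_list.length + 1) node tree_string

-- ===== PORT B =====
-- Source B line 'for i, p in enumerate(parents): children.setdefault(p, []).append(idx_list[i])';
-- 'setdefault(p, []).append(c)' is exactly 'modify p [] (· ++ [c])'; pyGetD's default 0
-- stands for the IndexError Source B raises when parents outruns idx_list (outside Pre_)
def pvKidsDict (idx_list parents : List Int) : PySem.Dict Int (List Int) :=
  (PySem.List.enumerate parents).foldl
    (fun d ip => d.modify ip.2 [] (fun cs => cs ++ [PySem.List.pyGetD idx_list ip.1 0]))
    PySem.Dict.empty

-- Source B's while-loop over the explicit stack, totalized with a step fuel that under Pre_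
-- dominates the number of visited nodes. Python keeps the stack top at the list END and
-- does 'stack.extend(reversed(ch)); ... stack.pop()'; modelled with the top at the HEAD,
-- that is exactly 'ch ++ rest'.
def pvLoop (d : PySem.Dict Int (List Int)) : Nat → List Int → String → String
  | _, [], ts => ts
  | 0, _ :: _, ts => ts
  | fuel+1, n :: rest, ts =>
    let ch := d.getD n []
    if ch.length > 0 then
      let rep := "TQ" ++ PySem.Int.toStr n
      pvLoop d fuel (ch ++ rest)
        (PySem.Str.replace ts rep
          ("(TQ" ++ PySem.Str.join ",TQ" (ch.map PySem.Int.toStr) ++ ")" ++ rep))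
    else pvLoop d fuel rest ts

def build_subtree_alt (idx_list : List Int) (parents : List Int) (node : Int) (tree_string : String) : List Int × String :=
  ([], pvLoop (pvKidsDict idx_list parents)
        ((idx_list.length + 2) ^ (idx_list.length + 2)) [node] tree_string)

-- ===== PRECONDITION & SPEC =====
-- children of n read off the zipped lists (independent of both ports)
def pvKidsP (idx_list parents : List Int) (n : Int) : List Int :=
  (parents.zip idx_list).filterMap (fun pc => if pc.1 = n then some pc.2 else none)

-- deduplicated frontier: distinct nodes reachable from S in exactly k child steps
def pvFrontier (idx_list parents : List Int) : Nat → List Int → List Int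
  | 0, S => S
  | k+1, S => ((pvFrontier idx_list parents k S).flatMap (pvKidsP idx_list parents)).dedup

-- Pre_ excludes (i) inputs where parents is longer than idx_list — there A raises
-- IndexError whenever the traversal meets one of the extra entries and may return only
-- when it never does, while B's one-pass dictionary build raises IndexError always
-- (see claim.json cites) — and (ii) inputs whose parent-link graph has a cycle reachable
-- from node (frontier still non-empty after idx_list.length+1 steps): there A raises
-- RecursionError and B's while-loop never terminates.
def Pre_build_subtree (idx_list : List Int) (parents : List Int) (node : Int) (tree_string : String) : Prop :=
  parents.length ≤ idx_list.length ∧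
  pvFrontier idx_list parents (idx_list.length + 1) [node] = []

instance (idx_list : List Int) (parents : List Int) (node : Int) (tree_string : String) : Decidable (Pre_build_subtree idx_list parents node tree_string) := by
  unfold Pre_build_subtree; infer_instance

def pvWitness_build_subtree : List Int × List Int × Int × String := ([1, 2], [0, 1], 0, "TQ0")

def Spec_build_subtree (idx_list : List Int) (parents : List Int) (node : Int) (tree_string : String) (out : List Int × String) : Prop := out = build_subtree_alt idx_list parents node tree_string
instance (idx_list : List Int) (parents : List Int) (node : Int) (tree_string : String) (out : List Int × String) : Decidable (Spec_build_subtree idx_list parents node tree_string out) := by unfold Spec_build_subtree; infer_instance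

-- ===== CLAIM (what is proved, stated in full; the proofs are below) =====
def Claim_equal_build_subtree : Prop := ∀ (idx_list : List Int) (parents : List Int) (node : Int) (tree_string : String), Dom_build_subtree idx_list parents node tree_string → Pre_build_subtree idx_list parents node tree_string → Spec_build_subtree idx_list parents node tree_string (build_subtree idx_list parents node tree_string)

-- ===== LEMMAS AND PROOFS =====

-- nodes reachable from n in exactly k child steps, with multiplicity (proof device)
def pvReach (idx_list parents : List Int) : Nat → Int → List Int
  | 0, n => [n]
  | k+1, n => (pvKidsP idx_list parents n).flatMap (pvReach idx_list parents k)

-- canonical one-node step of the traversal (fuel idx_list.length + 1 always suffices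
-- for a node with empty (idx_list.length + 1)-reach)
def pvStep (idx_list parents : List Int) (ts : String) (n : Int) : String :=
  (pvGoA idx_list parents (idx_list.length + 1) n ts).2

-- number of nodes the traversal visits below n, fuelled like pvGoA
def pvV (idx_list parents : List Int) : Nat → Int → Nat
  | 0, _ => 1
  | f+1, n => 1 + ((pvChilds idx_list parents n).map (pvV idx_list parents f)).sum

theorem pvReach_succ_right (idx_list parents : List Int) :
    ∀ (k : Nat) (n x : Int), x ∈ pvReach idx_list parents (k+1) n ↔
      ∃ y ∈ pvReach idx_list parents k n, x ∈ pvKidsP idx_list parents y := by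
  intro k
  induction k with
  | zero => intro n x; simp [pvReach]
  | succ k ih =>
    intro n x
    constructor
    · intro hx
      rcases List.mem_flatMap.1 hx with ⟨c, hc, hxc⟩
      rcases (ih c x).1 hxc with ⟨y, hy, hxy⟩
      exact ⟨y, List.mem_flatMap.2 ⟨c, hc, hy⟩, hxy⟩
    · rintro ⟨y, hy, hxy⟩
      rcases List.mem_flatMap.1 hy with ⟨c, hc, hyc⟩
      exact List.mem_flatMap.2 ⟨c, hc, (ih c x).2 ⟨y, hyc, hxy⟩⟩

theorem pvFrontier_mem (idx_list parents : List Int) :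
    ∀ (k : Nat) (S : List Int) (x : Int), x ∈ pvFrontier idx_list parents k S ↔
      ∃ n ∈ S, x ∈ pvReach idx_list parents k n := by
  intro k
  induction k with
  | zero => intro S x; simp [pvFrontier, pvReach]
  | succ k ih =>
    intro S x
    show x ∈ ((pvFrontier idx_list parents k S).flatMap (pvKidsP idx_list parents)).dedup ↔ _
    rw [List.mem_dedup, List.mem_flatMap]
    constructor
    · rintro ⟨y, hy, hxy⟩
      rcases (ih S y).1 hy with ⟨n, hn, hyn⟩
      exact ⟨n, hn, (pvReach_succ_right idx_list parents k n x).2 ⟨y, hyn, hxy⟩⟩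
    · rintro ⟨n, hn, hx⟩
      rcases (pvReach_succ_right idx_list parents k n x).1 hx with ⟨y, hyn, hxy⟩
      exact ⟨y, (ih S y).2 ⟨n, hn, hyn⟩, hxy⟩

theorem pvReach_empty_succ (idx_list parents : List Int) (k : Nat) (n : Int)
    (h : pvReach idx_list parents k n = []) : pvReach idx_list parents (k+1) n = [] := by
  rw [List.eq_nil_iff_forall_not_mem]
  intro x hx
  rcases (pvReach_succ_right idx_list parents k n x).1 hx with ⟨y, hy, _⟩
  rw [h] at hy; exact absurd hy (List.not_mem_nil)

theorem pvReach_child (idx_list parents : List Int) (k : Nat) (n ch : Int)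
    (h : pvReach idx_list parents (k+1) n = []) (hch : ch ∈ pvKidsP idx_list parents n) :
    pvReach idx_list parents k ch = [] := by
  have := List.flatMap_eq_nil_iff.1 h
  exact this ch hch

-- under the length condition A's scanned children equal the zip-read children
theorem pvChilds_enum_eq (n : Int) :
    ∀ (ps idx : List Int) (s : Nat), s + ps.length ≤ idx.length →
      ((PySem.List.enumerate ps (s:Int)).filter (fun ip => ip.2 == n)).map
          (fun ip => PySem.List.pyGetD idx ip.1 0)
        = (ps.zip (idx.drop s)).filterMap (fun pc => if pc.1 = n then some pc.2 else none) := by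
  intro ps
  induction ps with
  | nil => intro idx s h; simp [PySem.List.enumerate_nil]
  | cons p ps ih =>
    intro idx s h
    have hs : s < idx.length := by simp at h; omega
    have hdrop : idx.drop s = idx[s] :: idx.drop (s+1) := List.drop_eq_getElem_cons hs
    have hget : PySem.List.pyGetD idx ((s:Nat):Int) 0 = idx[s] := by
      rw [PySem.List.pyGetD_natCast, List.getD_eq_getElem _ _ hs]
    have hcast : ((s:Int) + 1) = (((s+1 : Nat)):Int) := by push_cast; ring
    rw [PySem.List.enumerate_cons, hdrop]
    by_cases hp : p = n
    · subst hp
      simp only [List.filter_cons, List.zip_cons_cons, List.filterMap_cons, BEq.rfl,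
        ite_true, List.map_cons, hget, hcast]
      rw [ih idx (s+1) (by simp at h ⊢; omega)]
    · have hbeq : (p == n) = false := by simp [hp]
      simp only [List.filter_cons, List.zip_cons_cons, List.filterMap_cons, hbeq,
        if_neg hp, Bool.false_eq_true, if_false, hcast]
      rw [ih idx (s+1) (by simp at h ⊢; omega)]

theorem pvChilds_eq_kidsP (idx_list parents : List Int) (n : Int)
    (hle : parents.length ≤ idx_list.length) :
    pvChilds idx_list parents n = pvKidsP idx_list parents n := by
  have := pvChilds_enum_eq n parents idx_list 0 (by omega)
  simpa [pvChilds, pvKidsP] using this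

-- B's one-pass dictionary groups exactly A's per-node scan
theorem pvKidsFold_getD (idx_list : List Int) (n : Int) :
    ∀ (l : List (Int × Int)) (d : PySem.Dict Int (List Int)),
      (l.foldl (fun d ip => d.modify ip.2 []
          (fun cs => cs ++ [PySem.List.pyGetD idx_list ip.1 0])) d).getD n []
        = d.getD n [] ++ ((l.filter (fun ip => ip.2 == n)).map
            (fun ip => PySem.List.pyGetD idx_list ip.1 0)) := by
  intro l
  induction l with
  | nil => intro d; simp
  | cons a t ih =>
    intro d
    rw [List.foldl_cons, ih]
    rw [PySem.Dict.getD_modify]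
    by_cases hna : n = a.2
    · have hbeq : (a.2 == n) = true := by simp [hna]
      simp [hna]
    · have hbeq : (a.2 == n) = false := by simp [Ne.symm hna]
      simp [hbeq, hna]

theorem pvKidsDict_getD (idx_list parents : List Int) (n : Int) :
    (pvKidsDict idx_list parents).getD n [] = pvChilds idx_list parents n := by
  unfold pvKidsDict pvChilds
  rw [pvKidsFold_getD idx_list n (PySem.List.enumerate parents) PySem.Dict.empty]
  simp [PySem.Dict.getD_empty]

theorem pvGoA_stable (idx_list parents : List Int)
    (hle : parents.length ≤ idx_list.length) :
    ∀ (k : Nat) (n : Int), pvReach idx_list parents k n = [] →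
      ∀ (f g : Nat) (ts : String), k ≤ f → k ≤ g →
        pvGoA idx_list parents f n ts = pvGoA idx_list parents g n ts := by
  intro k
  induction k with
  | zero => intro n h; simp [pvReach] at h
  | succ k ih =>
    intro n h f g ts hf hg
    cases f with
    | zero => omega
    | succ f =>
      cases g with
      | zero => omega
      | succ g =>
        simp only [pvGoA]
        apply List.foldl_ext
        intro acc ch hch
        have hch' : ch ∈ pvKidsP idx_list parents n := by
          rwa [pvChilds_eq_kidsP idx_list parents n hle] at hch
        exact ih ch (pvReach_child idx_list parents k n ch h hch') f g acc.2
          (by omega) (by omega)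

theorem pv_foldl_fst (idx_list parents : List Int) (f : Nat) :
    ∀ (l : List Int) (init : List Int × String),
      (∀ ch ∈ l, ∀ ts, (pvGoA idx_list parents f ch ts).1 = []) → l ≠ [] →
      (l.foldl (fun acc ch => pvGoA idx_list parents f ch acc.2) init).1 = [] := by
  intro l
  induction l with
  | nil => intro init h hne; exact absurd rfl hne
  | cons a rest ih =>
    intro init h hne
    cases rest with
    | nil => simpa using h a (by simp) init.2
    | cons b rest' =>
      simp only [List.foldl_cons]
      exact ih _ (fun ch hch ts => h ch (List.mem_cons_of_mem _ hch) ts) (by simp)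

theorem pv_foldl_snd (idx_list parents : List Int) (f : Nat) :
    ∀ (l : List Int) (init : List Int × String),
      (l.foldl (fun acc ch => pvGoA idx_list parents f ch acc.2) init).2
        = l.foldl (fun s ch => (pvGoA idx_list parents f ch s).2) init.2 := by
  intro l
  induction l with
  | nil => intro init; rfl
  | cons a rest ih =>
    intro init
    simp only [List.foldl_cons]
    rw [ih]

theorem pvGoA_fst (idx_list parents : List Int)
    (hle : parents.length ≤ idx_list.length) :
    ∀ (k : Nat) (n : Int), pvReach idx_list parents k n = [] →
      ∀ (f : Nat) (ts : String), k ≤ f → (pvGoA idx_list parents f n ts).1 = [] := by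
  intro k
  induction k with
  | zero => intro n h; simp [pvReach] at h
  | succ k ih =>
    intro n h f ts hf
    cases f with
    | zero => omega
    | succ f =>
      simp only [pvGoA]
      by_cases hc : pvChilds idx_list parents n = []
      · simp [hc]
      · apply pv_foldl_fst
        · intro ch hch ts'
          have hch' : ch ∈ pvKidsP idx_list parents n := by
            rwa [pvChilds_eq_kidsP idx_list parents n hle] at hch
          exact ih ch (pvReach_child idx_list parents k n ch h hch') f ts' (by omega)
        · exact hc

theorem pvGoA_snd_rec (idx_list parents : List Int)
    (hle : parents.length ≤ idx_list.length)
    (n : Int) (ts : String)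
    (h : pvReach idx_list parents (idx_list.length + 1) n = []) :
    pvStep idx_list parents ts n =
      (pvChilds idx_list parents n).foldl (pvStep idx_list parents)
        (if (pvChilds idx_list parents n).length > 0
         then PySem.Str.replace ts ("TQ" ++ PySem.Int.toStr n)
                (("(TQ" ++ PySem.Str.join ",TQ" ((pvChilds idx_list parents n).map PySem.Int.toStr) ++ ")") ++ ("TQ" ++ PySem.Int.toStr n))
         else ts) := by
  have hunf : pvGoA idx_list parents (idx_list.length + 1) n ts =
      (pvChilds idx_list parents n).foldl
        (fun acc ch => pvGoA idx_list parents idx_list.length ch acc.2)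
        (pvChilds idx_list parents n,
          if (pvChilds idx_list parents n).length > 0
          then PySem.Str.replace ts ("TQ" ++ PySem.Int.toStr n)
                (("(TQ" ++ PySem.Str.join ",TQ" ((pvChilds idx_list parents n).map PySem.Int.toStr) ++ ")") ++ ("TQ" ++ PySem.Int.toStr n))
          else ts) := rfl
  show (pvGoA idx_list parents (idx_list.length + 1) n ts).2 = _
  rw [hunf, pv_foldl_snd]
  apply List.foldl_ext
  intro s ch hch
  have hch' : ch ∈ pvKidsP idx_list parents n := by
    rwa [pvChilds_eq_kidsP idx_list parents n hle] at hch
  have hr : pvReach idx_list parents idx_list.length ch = [] :=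
    pvReach_child idx_list parents idx_list.length n ch h hch'
  show (pvGoA idx_list parents idx_list.length ch s).2
      = (pvGoA idx_list parents (idx_list.length + 1) ch s).2
  exact congrArg Prod.snd
    (pvGoA_stable idx_list parents hle idx_list.length ch hr
      (idx_list.length) (idx_list.length + 1) s (by omega) (by omega))

theorem pvV_succ (idx_list parents : List Int) (f : Nat) (n : Int) :
    pvV idx_list parents (f + 1) n
      = 1 + ((pvChilds idx_list parents n).map (pvV idx_list parents f)).sum := rfl

theorem pvV_stable (idx_list parents : List Int)
    (hle : parents.length ≤ idx_list.length) :
    ∀ (k : Nat) (n : Int), pvReach idx_list parents k n = [] →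
      ∀ (f g : Nat), k ≤ f → k ≤ g →
        pvV idx_list parents f n = pvV idx_list parents g n := by
  intro k
  induction k with
  | zero => intro n h; simp [pvReach] at h
  | succ k ih =>
    intro n h f g hf hg
    cases f with
    | zero => omega
    | succ f =>
      cases g with
      | zero => omega
      | succ g =>
        rw [pvV_succ, pvV_succ]
        congr 1
        refine congrArg List.sum (List.map_congr_left (fun ch hch => ?_))
        have hch' : ch ∈ pvKidsP idx_list parents n := by
          rwa [pvChilds_eq_kidsP idx_list parents n hle] at hch
        exact ih ch (pvReach_child idx_list parents k n ch h hch') f g (by omega) (by omega)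

theorem pvV_bound (idx_list parents : List Int) :
    ∀ (f : Nat) (n : Int), pvV idx_list parents f n ≤ (parents.length + 2) ^ f := by
  intro f
  induction f with
  | zero => intro n; simp [pvV]
  | succ f ih =>
    intro n
    rw [pvV_succ]
    have hlen : (pvChilds idx_list parents n).length ≤ parents.length := by
      unfold pvChilds
      calc (((PySem.List.enumerate parents).filter (fun ip => ip.2 == n)).map
              (fun ip => PySem.List.pyGetD idx_list ip.1 0)).length
          = ((PySem.List.enumerate parents).filter (fun ip => ip.2 == n)).length := by
            rw [List.length_map]
        _ ≤ (PySem.List.enumerate parents).length := List.length_filter_le _ _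
        _ = parents.length := PySem.List.length_enumerate ..
    have hsum : (((pvChilds idx_list parents n).map (pvV idx_list parents f)).sum)
        ≤ (pvChilds idx_list parents n).length * (parents.length + 2) ^ f := by
      have := List.sum_le_card_nsmul ((pvChilds idx_list parents n).map (pvV idx_list parents f))
        ((parents.length + 2) ^ f) (by
          intro x hx
          rcases List.mem_map.1 hx with ⟨ch, hch, rfl⟩
          exact ih ch)
      simpa [List.length_map, smul_eq_mul] using this
    have hB : 1 ≤ (parents.length + 2) ^ f := Nat.one_le_pow _ _ (by omega)
    have hpow : (parents.length + 2) ^ (f + 1) = (parents.length + 2) ^ f * (parents.length + 2) := pow_succ _ _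
    have h2 : (pvChilds idx_list parents n).length * (parents.length + 2) ^ f
        ≤ parents.length * (parents.length + 2) ^ f := Nat.mul_le_mul_right _ hlen
    nlinarith

theorem pvStep_leaf (idx_list parents : List Int) (n : Int) (ts : String)
    (h : pvChilds idx_list parents n = []) : pvStep idx_list parents ts n = ts := by
  unfold pvStep
  simp [pvGoA, h]

theorem pvLoop_eq (idx_list parents : List Int)
    (hle : parents.length ≤ idx_list.length) :
    ∀ (fB : Nat) (S : List Int) (ts : String),
      (∀ s ∈ S, pvReach idx_list parents (idx_list.length + 1) s = []) →
      (S.map (pvV idx_list parents (idx_list.length + 1))).sum ≤ fB →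
      pvLoop (pvKidsDict idx_list parents) fB S ts = S.foldl (pvStep idx_list parents) ts := by
  intro fB
  induction fB with
  | zero =>
    intro S ts hS hsum
    cases S with
    | nil => simp [pvLoop]
    | cons n rest =>
      exfalso
      have h1 : 1 ≤ pvV idx_list parents (idx_list.length + 1) n := by
        rw [pvV_succ]; omega
      simp only [List.map_cons, List.sum_cons] at hsum
      omega
  | succ fB ih =>
    intro S ts hS hsum
    cases S with
    | nil => simp [pvLoop]
    | cons n rest =>
      have hn := hS n (by simp)
      have hrest : ∀ s ∈ rest, pvReach idx_list parents (idx_list.length + 1) s = [] :=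
        fun s hs => hS s (List.mem_cons_of_mem _ hs)
      have hkids : ∀ ch ∈ pvChilds idx_list parents n,
          pvReach idx_list parents (idx_list.length + 1) ch = [] := by
        intro ch hch
        have hch' : ch ∈ pvKidsP idx_list parents n := by
          rwa [pvChilds_eq_kidsP idx_list parents n hle] at hch
        exact pvReach_empty_succ idx_list parents _ ch
          (pvReach_child idx_list parents _ n ch hn hch')
      have hV : pvV idx_list parents (idx_list.length + 1) n
          = 1 + ((pvChilds idx_list parents n).map
              (pvV idx_list parents (idx_list.length + 1))).sum := by
        rw [pvV_succ]
        congr 1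
        refine congrArg List.sum (List.map_congr_left (fun ch hch => ?_))
        have hch' : ch ∈ pvKidsP idx_list parents n := by
          rwa [pvChilds_eq_kidsP idx_list parents n hle] at hch
        exact pvV_stable idx_list parents hle idx_list.length ch
          (pvReach_child idx_list parents _ n ch hn hch')
          idx_list.length (idx_list.length + 1) (by omega) (by omega)
      simp only [List.map_cons, List.sum_cons] at hsum
      simp only [pvLoop, pvKidsDict_getD]
      by_cases hc : (pvChilds idx_list parents n).length > 0
      · simp only [if_pos hc]
        rw [ih]
        · rw [List.foldl_cons]
          have hstep := pvGoA_snd_rec idx_list parents hle n ts hn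
          simp only [if_pos hc] at hstep
          rw [hstep, List.foldl_append]
        · intro s hs
          rcases List.mem_append.1 hs with h1 | h2
          · exact hkids s h1
          · exact hrest s h2
        · simp only [List.map_append, List.sum_append]
          rw [hV] at hsum
          omega
      · simp only [if_neg hc]
        have hnil : pvChilds idx_list parents n = [] := by
          cases hx : pvChilds idx_list parents n with
          | nil => rfl
          | cons a t => rw [hx] at hc; simp at hc
        rw [ih rest ts hrest (by omega), List.foldl_cons,
          pvStep_leaf idx_list parents n ts hnil]

-- ===== VERDICT (by name: the statement is the Claim_ definition above) =====
theorem build_subtree_spec : Claim_equal_build_subtree := by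
  intro idx_list parents node ts hdom hpre
  obtain ⟨hle, hfr⟩ := hpre
  show build_subtree idx_list parents node ts = build_subtree_alt idx_list parents node ts
  unfold build_subtree build_subtree_alt
  have hreach : pvReach idx_list parents (idx_list.length + 1) node = [] := by
    rw [List.eq_nil_iff_forall_not_mem]
    intro x hx
    have : x ∈ pvFrontier idx_list parents (idx_list.length + 1) [node] :=
      (pvFrontier_mem idx_list parents _ [node] x).2 ⟨node, by simp, hx⟩
    rw [hfr] at this
    exact absurd this (List.not_mem_nil)
  refine Prod.ext ?_ ?_
  · simp only
    exact pvGoA_fst idx_list parents hle (idx_list.length + 1) node hreach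
      (idx_list.length + 1) ts (by omega)
  · simp only
    have hsum : ([node].map (pvV idx_list parents (idx_list.length + 1))).sum
        ≤ (idx_list.length + 2) ^ (idx_list.length + 2) := by
      have hb := pvV_bound idx_list parents (idx_list.length + 1) node
      have hb2 : (parents.length + 2) ^ (idx_list.length + 1) ≤ (idx_list.length + 2) ^ (idx_list.length + 1) :=
        Nat.pow_le_pow_left (by omega) _
      have hb3 : (idx_list.length + 2) ^ (idx_list.length + 1) ≤ (idx_list.length + 2) ^ (idx_list.length + 2) :=
        Nat.pow_le_pow_right (by omega) (by omega)
      simp only [List.map_cons, List.map_nil, List.sum_cons, List.sum_nil]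
      omega
    rw [pvLoop_eq idx_list parents hle _ [node] ts (by intro s hs; simp at hs; rwa [hs]) hsum]
    simp [pvStep]
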